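-- pv_equiv track=rewrite | github.com/hsh5206/Algorithm_python | 프로그래머스/2018 카카오 블라인드 3차/1.py | solution
-- ===== SOURCE A (Python) =====
-- alpha = {10: 'A', 11: 'B', 12: 'C', 13: 'D', 14: 'E', 15: 'F'}
--
-- def solution(n, t, m, p):
--     all = ''
--     temp = 0
--     needs = p
--     for _ in range(t-1):
--         needs += m
--     while True:
--         if len(all) > needs:
--             break
--         all_temp = ''
--         temp2 = temp
--         while True:
--             k = temp2 % n
--             if k in alpha:
--                 k = alpha[k]
--             all_temp = str(k) + all_temp
--             if temp2 // n != 0: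
--                 temp2 = temp2 // n
--             else:
--                 break
--         all += all_temp
--         temp += 1
--
--     answer = ''
--     for i in range(p-1, (t-1)*m+p, m):
--         answer += str(all[i])
--
--     return answer
-- ===== SOURCE B (Python) =====
-- DIGITS = "0123456789ABCDEF"
--
-- def _char_at(j, n):
--     # locate the j-th character (0-based) of the stream "0" + "1" + ... in base n
--     d = 1          # digit-length of the current block of numbers
--     first = 0      # first number written with d digits
--     count = n      # how many numbers have d digits
--     while j >= count * d:
--         j -= count * d
--         d += 1
--         first = n ** (d - 1)
--         count = n ** d - first
--     num = first + j // d
--     q = j % d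
--     return DIGITS[(num // n ** (d - 1 - q)) % n]
--
-- def solution(n, t, m, p):
--     return ''.join(_char_at(p - 1 + i * m, n) for i in range(t))
-- ===== Notes on version B (the rewrite author's own statement) =====
-- stated objective: alternative
-- what changed: A materialises the whole concatenated digit stream up to the last needed position and then indexes into it; B never builds the stream and instead locates each of the t requested characters directly, walking the per-digit-length blocks (prefix sums of block sizes) and computing the owning integer and digit arithmetically (asymptotically less work, but a timing run's large inputs lie outside Pre_, so no speed is claimed).
-- outside the precondition, e.g. on solution(-2, 2, 1, 1): A returns '0-', B returns '0F'; on solution(17, 17, 1, 1): A returns '0123456789ABCDEF1', B raises IndexError; on solution(2, 1, 5, 0): A returns '0', B returns '1'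
import Mathlib
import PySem

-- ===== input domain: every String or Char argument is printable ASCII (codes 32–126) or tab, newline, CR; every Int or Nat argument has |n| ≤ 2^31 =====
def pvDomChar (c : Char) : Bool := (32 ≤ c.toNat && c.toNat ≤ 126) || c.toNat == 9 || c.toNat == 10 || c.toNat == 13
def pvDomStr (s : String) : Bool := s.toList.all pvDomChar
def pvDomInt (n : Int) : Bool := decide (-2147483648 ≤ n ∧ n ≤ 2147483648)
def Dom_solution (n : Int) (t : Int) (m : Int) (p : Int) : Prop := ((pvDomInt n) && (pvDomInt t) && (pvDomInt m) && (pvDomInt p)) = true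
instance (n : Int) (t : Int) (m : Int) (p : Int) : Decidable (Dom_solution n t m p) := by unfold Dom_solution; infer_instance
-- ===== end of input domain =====

-- B replaces A's "materialise the whole digit stream, then index it" with a direct
-- positional lookup (prefix sums of per-digit-length block sizes) — a different
-- algorithm; no speed is claimed (a timing run's large inputs lie outside Pre_).

-- ===== PORT A =====

-- the module-level 'alpha' dict
def pvAlpha : PySem.Dict Int String :=
  PySem.Dict.ofList [(10, "A"), (11, "B"), (12, "C"), (13, "D"), (14, "E"), (15, "F")]

-- A's inner 'while True' (digits of temp2 in base n, most significant first, prepended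
-- onto all_temp); fuel only makes the recursion total — under Pre_ it never runs out.
def pvInner (n : Int) : Nat → Int → String → String
  | 0, _, allTemp => allTemp
  | fuel + 1, temp2, allTemp =>
    let k := PySem.Int.mod temp2 n
    -- 'if k in alpha: k = alpha[k]' then 'str(k) + all_temp': str(alpha[k]) is alpha[k] itself
    let ks := if PySem.Dict.contains pvAlpha k then (PySem.Dict.get? pvAlpha k).getD "" else PySem.Int.toStr k
    let allTemp := ks ++ allTemp
    if PySem.Int.floordiv temp2 n ≠ 0 then
      pvInner n fuel (PySem.Int.floordiv temp2 n) allTemp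
    else
      allTemp

-- A's outer 'while True' (append representations until len(all) > needs); fuel as above.
def pvOuter (n : Int) (needs : Int) : Nat → Int → String → String
  | 0, _, all => all
  | fuel + 1, temp, all =>
    if PySem.Str.len all > needs then all
    else pvOuter n needs fuel (temp + 1) (all ++ pvInner n (temp.toNat + 1) temp "")

def solution (n : Int) (t : Int) (m : Int) (p : Int) : String :=
  let needs := (PySem.List.pyRange 0 (t - 1) 1).foldl (fun acc _ => acc + m) p
  let all := pvOuter n needs (needs.toNat + 2) 0 ""
  -- answer loop: str(all[i]) is all[i] itself (a one-character string)
  (PySem.List.pyRange (p - 1) ((t - 1) * m + p) m).foldl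
    (fun answer i => answer ++ String.ofList [(PySem.Str.pyGet? all i).getD ' ']) ""

-- ===== PORT B =====

def pvDigits : String := "0123456789ABCDEF"

-- B's _char_at while loop; fuel only makes the recursion total.
def pvCharAt (n : Int) : Nat → Int → Int → Int → Int → Char
  | 0, _, _, _, _ => ' '
  | fuel + 1, j, d, first, count =>
    if count * d ≤ j then
      -- j -= count*d; d += 1; first = n**(d-1); count = n**d - first
      pvCharAt n fuel (j - count * d) (d + 1) (n ^ d.toNat) (n ^ (d + 1).toNat - n ^ d.toNat)
    else
      let num := first + PySem.Int.floordiv j d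
      let q := PySem.Int.mod j d
      (PySem.Str.pyGet? pvDigits (PySem.Int.mod (PySem.Int.floordiv num (n ^ (d - 1 - q).toNat)) n)).getD ' '

def solution_alt (n : Int) (t : Int) (m : Int) (p : Int) : String :=
  String.ofList ((PySem.List.pyRange 0 t 1).map
    (fun i => pvCharAt n ((p - 1 + i * m).toNat + 1) (p - 1 + i * m) 1 0 n))

-- ===== PRECONDITION & SPEC =====
-- Pre_ is the problem's natural domain (2 ≤ n ≤ 16, any t, m ≥ 1, p ≥ 1): outside it A raises
-- (n = 0: ZeroDivisionError, m = 0: ValueError), diverges (n = 1), or returns strings made of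
-- accidental artefacts of str()/negative indexing ('-' signs from a negative base, multi-character
-- "digits" for n ≥ 17, wrap-around all[-1] for p ≤ 0) that are not values of the stated
-- base-n digit stream; B naturally raises IndexError on the n ≥ 17 cases.
def Pre_solution (n : Int) (t : Int) (m : Int) (p : Int) : Prop :=
  2 ≤ n ∧ n ≤ 16 ∧ 1 ≤ m ∧ 1 ≤ p
instance (n : Int) (t : Int) (m : Int) (p : Int) : Decidable (Pre_solution n t m p) := by
  unfold Pre_solution; infer_instance

def pvWitness_solution : Int × Int × Int × Int := (2, 4, 2, 1)

def Spec_solution (n : Int) (t : Int) (m : Int) (p : Int) (out : String) : Prop := out = solution_alt n t m p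
instance (n : Int) (t : Int) (m : Int) (p : Int) (out : String) : Decidable (Spec_solution n t m p out) := by unfold Spec_solution; infer_instance

-- ===== CLAIM (what is proved, stated in full; the proofs are below) =====
def Claim_equal_solution : Prop := ∀ (n : Int) (t : Int) (m : Int) (p : Int), Dom_solution n t m p → Pre_solution n t m p → Spec_solution n t m p (solution n t m p)

-- ===== LEMMAS AND PROOFS =====

-- digit k of the common character alphabet
def pvDigitChar (k : Nat) : Char := pvDigits.toList.getD k ' '

-- the base-N representation A writes for the integer x (most significant digit first)
def pvRep (N : Nat) (x : Nat) : List Char :=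
  if x = 0 then ['0'] else ((Nat.digits N x).map pvDigitChar).reverse

-- the stream: representations of 0, 1, …, k-1 concatenated
def pvS (N : Nat) (k : Nat) : List Char := (List.range k).flatMap (pvRep N)

-- the j-th character of the infinite stream (each pvRep is nonempty, so k = j+1 is enough)
def pvStream (N : Nat) (j : Nat) : Char := (pvS N (j + 1)).getD j ' '

-- the first integer written with d digits
def pvFirst (N d : Nat) : Nat := if d = 1 then 0 else N ^ (d - 1)

theorem pvRep_length_pos (N x : Nat) : 0 < (pvRep N x).length := by
  unfold pvRep
  split
  · simp
  · simpa [List.length_pos_iff] using Nat.digits_ne_nil_iff_ne_zero.mpr ‹¬x = 0›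

theorem pvS_succ (N k : Nat) : pvS N (k + 1) = pvS N k ++ pvRep N k := by
  simp [pvS, List.range_succ]

theorem pvS_le_length (N k : Nat) : k ≤ (pvS N k).length := by
  induction k with
  | zero => simp [pvS]
  | succ k ih =>
    rw [pvS_succ]
    have := pvRep_length_pos N k
    simp only [List.length_append]; omega

theorem pvS_prefix (N : Nat) {a b : Nat} (h : a ≤ b) : (pvS N a) <+: (pvS N b) := by
  obtain ⟨c, rfl⟩ := Nat.exists_eq_add_of_le h
  simp only [pvS, List.range_add, List.flatMap_append]
  exact ⟨_, rfl⟩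

theorem pvS_getD_eq_stream (N : Nat) {k j : Nat} (h : j < (pvS N k).length) :
    (pvS N k).getD j ' ' = pvStream N j := by
  unfold pvStream
  rcases le_total k (j + 1) with hk | hk
  · obtain ⟨l, hl⟩ := pvS_prefix N hk
    rw [← hl, List.getD_append _ _ _ _ h]
  · obtain ⟨l, hl⟩ := pvS_prefix N hk
    have hj : j < (pvS N (j + 1)).length :=
      lt_of_lt_of_le (Nat.lt_succ_self j) (pvS_le_length N (j + 1))
    rw [← hl, List.getD_append _ _ _ _ hj]

-- A's digit step: looking k up in alpha (else str(k)) yields exactly pvDigitChar k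
theorem pvDigitStr (k : Nat) (hk : k < 16) :
    ((if PySem.Dict.contains pvAlpha ((k : Nat) : Int) then
        (PySem.Dict.get? pvAlpha ((k : Nat) : Int)).getD ""
      else PySem.Int.toStr ((k : Nat) : Int)) : String).toList = [pvDigitChar k] := by
  interval_cases k <;> decide

-- pvRep unfolding
theorem pvRep_small {N x : Nat} (hN : 2 ≤ N) (hx : x < N) : pvRep N x = [pvDigitChar x] := by
  rcases Nat.eq_zero_or_pos x with rfl | hpos
  · rfl
  · unfold pvRep
    rw [if_neg (by omega), Nat.digits_def' (by omega) hpos,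
        Nat.mod_eq_of_lt hx, Nat.div_eq_of_lt hx]
    simp

theorem pvRep_step {N x : Nat} (hN : 2 ≤ N) (hx : N ≤ x) :
    pvRep N x = pvRep N (x / N) ++ [pvDigitChar (x % N)] := by
  have hpos : 0 < x := by omega
  have hdiv : x / N ≠ 0 := by
    intro h
    have := Nat.lt_of_div_eq_zero (by omega) h
    omega
  unfold pvRep
  rw [if_neg (by omega), if_neg hdiv, Nat.digits_def' (by omega) hpos]
  simp

-- A's inner loop computes pvRep (prepended onto the accumulator)
theorem pvInner_eq (N : Nat) (hN2 : 2 ≤ N) (hN16 : N ≤ 16) :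
    ∀ (fuel x : Nat), x < fuel → ∀ (acc : String),
      (pvInner (N : Int) fuel (x : Int) acc).toList = pvRep N x ++ acc.toList := by
  intro fuel
  induction fuel with
  | zero => intro x hx; omega
  | succ fuel ih =>
    intro x hx acc
    rw [pvInner]
    rw [PySem.Int.mod_natCast, PySem.Int.floordiv_natCast]
    have hk16 : x % N < 16 := lt_of_lt_of_le (Nat.mod_lt x (by omega)) hN16
    by_cases hlt : x < N
    · have hdiv : x / N = 0 := Nat.div_eq_of_lt hlt
      rw [hdiv]
      simp only [Nat.cast_zero, ne_eq, not_true_eq_false, if_false]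
      rw [String.toList_append, pvDigitStr _ hk16, Nat.mod_eq_of_lt hlt,
        pvRep_small hN2 hlt]
    · have hge : N ≤ x := le_of_not_gt hlt
      have hdiv0 : x / N ≠ 0 := by
        intro h; exact absurd (Nat.lt_of_div_eq_zero (by omega) h) hlt
      rw [if_pos (by exact_mod_cast hdiv0)]
      have hxdiv : x / N < x := Nat.div_lt_self (by omega) (by omega)
      rw [ih (x / N) (by omega)]
      rw [String.toList_append, pvDigitStr _ hk16, pvRep_step hN2 hge]
      simp

-- A's outer loop reaches a state all = pvS N K with needs < len(all)
theorem pvOuter_eq (N : Nat) (needs : Int) (hN2 : 2 ≤ N) (hN16 : N ≤ 16) :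
    ∀ (fuel k : Nat) (all : String), all.toList = pvS N k →
      needs < ((pvS N k).length : Int) + (fuel : Int) →
      ∃ K : Nat, (pvOuter (N : Int) needs fuel (k : Int) all).toList = pvS N K ∧
        needs < ((pvS N K).length : Int) := by
  intro fuel
  induction fuel with
  | zero =>
    intro k all hall hlen
    exact ⟨k, hall, by simpa using hlen⟩
  | succ fuel ih =>
    intro k all hall hlen
    rw [pvOuter]
    rw [PySem.Str.len_eq, hall]
    by_cases hc : needs < ((pvS N k).length : Int)
    · rw [if_pos (by exact_mod_cast hc)]
      exact ⟨k, hall, hc⟩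
    · rw [if_neg (by exact_mod_cast hc)]
      have hnat : ((k : Int)).toNat = k := by simp
      rw [hnat]
      have hinner := pvInner_eq N hN2 hN16 (k + 1) k (Nat.lt_succ_self k) ""
      have hnext : (all ++ pvInner (N : Int) (k + 1) (k : Int) "").toList = pvS N (k + 1) := by
        rw [String.toList_append, hinner, hall, pvS_succ]
        simp
      have hcast : ((k : Int)) + 1 = ((k + 1 : Nat) : Int) := by push_cast; ring
      rw [hcast]
      apply ih (k + 1) _ hnext
      have h1 : (pvS N k).length + 1 ≤ (pvS N (k + 1)).length := by
        rw [pvS_succ]; have := pvRep_length_pos N k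
        simp only [List.length_append]; omega
      have h2 : ((pvS N k).length : Int) ≤ needs := le_of_not_gt hc
      push_cast at hlen ⊢
      omega

-- every x in block d has a d-character representation
theorem pvRep_len_block {N d x : Nat} (hN : 2 ≤ N) (hd : 1 ≤ d)
    (h1 : pvFirst N d ≤ x) (h2 : x < N ^ d) : (pvRep N x).length = d := by
  rcases eq_or_lt_of_le hd with hd1 | hd2
  · rw [← hd1] at h2 ⊢
    rw [pow_one] at h2
    rw [pvRep_small hN h2]
    rfl
  · have hfirst : pvFirst N d = N ^ (d - 1) := by
      unfold pvFirst; rw [if_neg (by omega)]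
    rw [hfirst] at h1
    have hx0 : x ≠ 0 := by
      have : 0 < N ^ (d - 1) := Nat.pow_pos (by omega)
      omega
    unfold pvRep
    rw [if_neg hx0]
    simp only [List.length_reverse, List.length_map]
    rw [Nat.length_digits N x (by omega) hx0]
    have hlog : Nat.log N x = d - 1 := by
      apply Nat.log_eq_of_pow_le_of_lt_pow h1
      have : d - 1 + 1 = d := by omega
      rw [this]; exact h2
    omega

-- the characters contributed by c consecutive integers of block d
theorem pvS_block_length {N d : Nat} (hN : 2 ≤ N) (hd : 1 ≤ d) :
    ∀ (c a : Nat), pvFirst N d ≤ a → a + c ≤ N ^ d →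
      (pvS N (a + c)).length = (pvS N a).length + c * d := by
  intro c
  induction c with
  | zero => intro a _ _; simp
  | succ c ih =>
    intro a h1 h2
    have : a + (c + 1) = (a + c) + 1 := by omega
    rw [this, pvS_succ, List.length_append,
      ih a h1 (by omega),
      pvRep_len_block hN hd (by unfold pvFirst at h1 ⊢; omega) (by omega)]
    ring

-- nth digit of Nat.digits
theorem pvDigits_getElem (b : Nat) (hb : 1 < b) :
    ∀ (i n : Nat) (h : i < (Nat.digits b n).length),
      (Nat.digits b n)[i] = n / b ^ i % b := by
  intro i
  induction i with
  | zero =>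
    intro n h
    have hn : 0 < n := by
      rcases Nat.eq_zero_or_pos n with rfl | hn
      · simp at h
      · exact hn
    have key := Nat.digits_def' hb hn
    simp [key]
  | succ i ih =>
    intro n h
    have hn : 0 < n := by
      rcases Nat.eq_zero_or_pos n with rfl | hn
      · simp at h
      · exact hn
    have key := Nat.digits_def' hb hn
    have h' : i < (Nat.digits b (n / b)).length := by
      rw [key] at h; simpa using h
    calc (Nat.digits b n)[i + 1] = (Nat.digits b (n / b))[i] := by simp [key]
      _ = n / b / b ^ i % b := ih _ h'
      _ = n / b ^ (i + 1) % b := by rw [Nat.div_div_eq_div_mul, pow_succ']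

-- the digit formula for pvRep
theorem pvRep_digit {N x d q : Nat} (hN : 2 ≤ N) (hlen : (pvRep N x).length = d) (hq : q < d) :
    (pvRep N x).getD q ' ' = pvDigitChar (x / N ^ (d - 1 - q) % N) := by
  rcases Nat.eq_zero_or_pos x with rfl | hx
  · have hd : d = 1 := by simpa [pvRep] using hlen.symm
    subst hd
    have hq0 : q = 0 := by omega
    subst hq0
    simp [pvRep, pvDigitChar]
    rfl
  · have hx0 : x ≠ 0 := by omega
    have hlen' : (Nat.digits N x).length = d := by
      unfold pvRep at hlen
      rw [if_neg hx0] at hlen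
      simpa using hlen
    unfold pvRep
    rw [if_neg hx0]
    have hq' : q < (((Nat.digits N x).map pvDigitChar).reverse).length := by
      simp [hlen']; omega
    rw [List.getD_eq_getElem _ _ hq', List.getElem_reverse]
    have hidx : ((Nat.digits N x).map pvDigitChar).length - 1 - q < (Nat.digits N x).length := by
      simp [hlen']; omega
    rw [List.getElem_map]
    congr 1
    rw [pvDigits_getElem N (by omega)]
    congr 2
    simp [hlen']

-- block sizes are at least 2 characters
theorem pvBlock_ge_two {N d : Nat} (hN : 2 ≤ N) (hd : 1 ≤ d) :
    2 ≤ (N ^ d - pvFirst N d) * d := by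
  unfold pvFirst
  rcases eq_or_lt_of_le hd with hd1 | hd2
  · rw [if_pos hd1.symm, ← hd1, pow_one]
    omega
  · rw [if_neg (by omega)]
    have h2 : N ^ (d - 1) * N = N ^ d := by
      rw [← pow_succ]
      congr 1
      omega
    have h1 : N ^ (d - 1) * 2 ≤ N ^ d := by
      rw [← h2]
      exact Nat.mul_le_mul_left _ hN
    have h3 : 2 ≤ N ^ (d - 1) := by
      calc 2 = 2 ^ 1 := rfl
        _ ≤ N ^ 1 := Nat.pow_le_pow_left hN _
        _ ≤ N ^ (d - 1) := Nat.pow_le_pow_right (by omega) (by omega)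
    have : 2 ≤ N ^ d - N ^ (d - 1) := by omega
    calc 2 ≤ N ^ d - N ^ (d - 1) := this
      _ ≤ (N ^ d - N ^ (d - 1)) * d := Nat.le_mul_of_pos_right _ (by omega)

theorem pvFirst_le_pow {N d : Nat} (hN : 2 ≤ N) (hd : 1 ≤ d) : pvFirst N d ≤ N ^ d := by
  unfold pvFirst
  split
  · omega
  · exact Nat.pow_le_pow_right (by omega) (by omega)

theorem pvFirst_succ {N d : Nat} (hd : 1 ≤ d) : pvFirst N (d + 1) = N ^ d := by
  unfold pvFirst
  rw [if_neg (by omega)]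
  congr 1

-- B's loop finds the stream character
theorem pvCharAt_eq (N : Nat) (hN2 : 2 ≤ N) (hN16 : N ≤ 16) :
    ∀ (fuel j d : Nat), 1 ≤ d → j < fuel →
      pvCharAt (N : Int) fuel (j : Int) (d : Int) ((pvFirst N d : Nat) : Int)
          (((N ^ d - pvFirst N d : Nat) : Nat) : Int)
        = pvStream N ((pvS N (pvFirst N d)).length + j) := by
  intro fuel
  induction fuel with
  | zero => intro j d _ hj; omega
  | succ fuel ih =>
    intro j d hd hj
    have hfle : pvFirst N d ≤ N ^ d := pvFirst_le_pow hN2 hd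
    have hblock : 2 ≤ (N ^ d - pvFirst N d) * d := pvBlock_ge_two hN2 hd
    rw [pvCharAt]
    by_cases hc : (N ^ d - pvFirst N d) * d ≤ j
    · -- loop continues: move to block d+1
      rw [if_pos (by exact_mod_cast Nat.cast_le.mpr hc)]
      have e1 : ((j : Int)) - ((N ^ d - pvFirst N d : Nat) : Int) * ((d : Int))
          = (((j - (N ^ d - pvFirst N d) * d : Nat)) : Int) := by
        rw [Nat.cast_sub hc]
        push_cast
        ring
      have e2 : ((d : Int)) + 1 = (((d + 1 : Nat)) : Int) := by push_cast; ring
      have e3 : ((N : Int)) ^ ((d : Int)).toNat = ((pvFirst N (d + 1) : Nat) : Int) := by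
        rw [pvFirst_succ hd]
        push_cast
        congr 1
      have e4 : ((N : Int)) ^ (((d : Int)) + 1).toNat - ((N : Int)) ^ ((d : Int)).toNat
          = (((N ^ (d + 1) - pvFirst N (d + 1) : Nat)) : Int) := by
        rw [pvFirst_succ hd]
        rw [Nat.cast_sub (Nat.pow_le_pow_right (by omega) (by omega))]
        have h1 : (((d : Int)) + 1).toNat = d + 1 := by omega
        have h2 : ((d : Int)).toNat = d := by omega
        rw [h1, h2]
        push_cast
        ring
      have hac : pvFirst N d + (N ^ d - pvFirst N d) = N ^ d := by omega
      have hlen : (pvS N (pvFirst N (d + 1))).length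
          = (pvS N (pvFirst N d)).length + (N ^ d - pvFirst N d) * d := by
        have h := pvS_block_length hN2 hd (N ^ d - pvFirst N d) (pvFirst N d)
          (le_refl _) (by omega)
        rw [hac] at h
        rw [pvFirst_succ hd]
        exact h
      -- the block is at least 2 characters, so the index drops by at least 2
      have hfuel : j - (N ^ d - pvFirst N d) * d < fuel := by
        generalize (N ^ d - pvFirst N d) * d = B at hc hblock
        omega
      rw [e1, e4, e3, e2,
        ih (j - (N ^ d - pvFirst N d) * d) (d + 1) (by omega) hfuel]
      congr 1
      generalize (N ^ d - pvFirst N d) * d = B at hc hlen ⊢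
      omega
    · -- exit: extract the digit
      rw [if_neg (by
        intro hcon
        exact hc (by exact_mod_cast hcon))]
      have hdpos : 0 < d := hd
      have hjlt : j < (N ^ d - pvFirst N d) * d := by omega
      simp only [PySem.Int.floordiv_natCast, PySem.Int.mod_natCast]
      have hqd : j % d < d := Nat.mod_lt _ hdpos
      have e5 : ((d : Int)) - 1 - ((j % d : Nat) : Int) = (((d - 1 - j % d : Nat)) : Int) := by
        omega
      have e6 : ((pvFirst N d : Nat) : Int) + ((j / d : Nat) : Int)
          = (((pvFirst N d + j / d : Nat)) : Int) := by push_cast; ring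
      rw [e6, e5]
      have e7 : ((N : Int)) ^ (((d - 1 - j % d : Nat) : Int)).toNat
          = (((N ^ (d - 1 - j % d) : Nat)) : Int) := by
        have ht : (((d - 1 - j % d : Nat) : Int)).toNat = d - 1 - j % d := by omega
        rw [ht]
        push_cast
        ring
      rw [e7, PySem.Int.floordiv_natCast, PySem.Int.mod_natCast, PySem.Str.pyGet?_natCast]
      -- the number holding position j, and the digit position inside it
      have hdivlt : j / d < N ^ d - pvFirst N d :=
        Nat.div_lt_of_lt_mul (by rw [Nat.mul_comm]; exact hjlt)
      have hnumlt : pvFirst N d + j / d < N ^ d := by omega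
      have hrep : (pvRep N (pvFirst N d + j / d)).length = d :=
        pvRep_len_block hN2 hd (Nat.le_add_right _ _) hnumlt
      have hSnum : (pvS N (pvFirst N d + j / d)).length
          = (pvS N (pvFirst N d)).length + (j / d) * d :=
        pvS_block_length hN2 hd (j / d) (pvFirst N d) (le_refl _) (by omega)
      have hJ : (pvS N (pvFirst N d)).length + j
          = (pvS N (pvFirst N d + j / d)).length + j % d := by
        rw [hSnum]
        have := Nat.div_add_mod j d
        have hmul : j / d * d = d * (j / d) := Nat.mul_comm _ _
        omega
      rw [hJ]
      have hlt1 : (pvS N (pvFirst N d + j / d)).length + j % d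
          < (pvS N (pvFirst N d + j / d + 1)).length := by
        rw [pvS_succ, List.length_append, hrep]
        omega
      rw [← pvS_getD_eq_stream N hlt1, pvS_succ,
        List.getD_append_right _ _ _ _ (by omega)]
      have hsub : (pvS N (pvFirst N d + j / d)).length + j % d
          - (pvS N (pvFirst N d + j / d)).length = j % d := by omega
      rw [hsub, pvRep_digit hN2 hrep hqd]
      rfl

-- the list of indices A's final loop visits
theorem pvRange_indices (t m p : Int) (ht : 0 ≤ t) (hm : 1 ≤ m) :
    PySem.List.pyRange (p - 1) ((t - 1) * m + p) m
      = (List.range t.toNat).map (fun k : Nat => (p - 1) + m * (k : Int)) := by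
  rw [PySem.List.pyRange_of_pos _ _ (by omega : (0 : Int) < m)]
  have hcount : (if p - 1 < (t - 1) * m + p then
        (((t - 1) * m + p - (p - 1) + m - 1) / m).toNat else 0) = t.toNat := by
    by_cases ht0 : t = 0
    · subst ht0
      rw [if_neg (by omega)]
      omega
    · have htm : 0 ≤ (t - 1) * m := mul_nonneg (by omega) (by omega)
      rw [if_pos (by omega)]
      have hnum : (t - 1) * m + p - (p - 1) + m - 1 = t * m := by ring
      rw [hnum, Int.mul_ediv_cancel t (by omega)]
  rw [hcount]

-- the answer-building fold appends one character per index
theorem pvFoldl_push (g : Int → Char) :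
    ∀ (l : List Int) (s : String),
      (l.foldl (fun a i => a ++ String.ofList [g i]) s).toList = s.toList ++ l.map g := by
  intro l
  induction l with
  | nil => intro s; simp
  | cons i l ih =>
    intro s
    simp [List.foldl_cons, ih, String.toList_append]

-- A's result, characterised as stream characters
theorem pvSolutionA (N T M P : Nat) (hN2 : 2 ≤ N) (hN16 : N ≤ 16) (hM : 1 ≤ M) (hP : 1 ≤ P) :
    (solution (N : Int) (T : Int) (M : Int) (P : Int)).toList
      = (List.range T).map (fun k => pvStream N (P - 1 + M * k)) := by
  rw [solution]
  have hlen0 : (PySem.List.pyRange 0 ((T : Int) - 1) 1).length = T - 1 := by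
    rw [PySem.List.pyRange_of_pos _ _ one_pos]
    rcases Nat.lt_or_ge 1 T with h' | h'
    · rw [if_pos (by omega)]
      simp
    · rw [if_neg (by omega)]
      simp
      omega
  rw [PySem.List.foldl_add _ (fun _ => (M : Int)), PySem.List.sum_map_const_int, hlen0]
  -- needs = P + (T-1)*M as an integer
  have hneeds : (P : Int) + ((T - 1 : Nat) : Int) * (M : Int) = ((P + (T - 1) * M : Nat) : Int) := by
    push_cast
    ring
  rw [hneeds]
  set needs : Nat := P + (T - 1) * M with hneedsdef
  -- run the outer loop
  obtain ⟨K, hK, hKlen⟩ := pvOuter_eq N ((needs : Nat) : Int) hN2 hN16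
    (((needs : Nat) : Int).toNat + 2) 0 "" (by simp [pvS])
    (by
      have : (((needs : Nat) : Int)).toNat = needs := by omega
      rw [this]
      push_cast
      omega)
  rw [pvRange_indices (T : Int) (M : Int) (P : Int) (by omega) (by exact_mod_cast hM)]
  rw [pvFoldl_push]
  have htoNat : ((T : Int)).toNat = T := by omega
  have hemp : ("" : String).toList = [] := by decide
  rw [htoNat, List.map_map, hemp, List.nil_append]
  simp only [Nat.cast_zero] at hK
  apply List.map_congr_left
  intro k hk
  have hkT : k < T := List.mem_range.mp hk
  have hidx : ((P : Int) - 1) + (M : Int) * (k : Int) = ((P - 1 + M * k : Nat) : Int) := by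
    push_cast
    omega
  simp only [Function.comp_apply]
  rw [hidx, PySem.Str.pyGet?_natCast, hK]
  have hjlt : P - 1 + M * k < (pvS N K).length := by
    have h1 : P - 1 + M * k + 1 ≤ needs := by
      have : M * k + M ≤ M * T := by
        calc M * k + M = M * (k + 1) := by ring
          _ ≤ M * T := Nat.mul_le_mul_left _ (by omega)
      have hTM : (T - 1) * M = M * T - M := by
        cases T with
        | zero => simp
        | succ T' => simp; ring_nf; omega
      omega
    omega
  rw [← List.getD_eq_getElem?_getD (l := pvS N K) (i := P - 1 + M * k) (a := ' ')]
  exact pvS_getD_eq_stream N hjlt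

-- B's result, characterised as stream characters
theorem pvSolutionB (N T M P : Nat) (hN2 : 2 ≤ N) (hN16 : N ≤ 16) (_hM : 1 ≤ M) (hP : 1 ≤ P) :
    (solution_alt (N : Int) (T : Int) (M : Int) (P : Int)).toList
      = (List.range T).map (fun k => pvStream N (P - 1 + M * k)) := by
  rw [solution_alt]
  have h01 : PySem.List.pyRange 0 (T : Int) 1 = (List.range T).map (fun k : Nat => (k : Int)) := by
    rw [PySem.List.pyRange_of_pos _ _ one_pos]
    rcases Nat.eq_zero_or_pos T with rfl | hT
    · rw [if_neg (by omega)]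
      simp
    · rw [if_pos (by omega)]
      have h2 : ((((T : Int)) - 0 + 1 - 1) / 1).toNat = T := by
        have : ((T : Int)) - 0 + 1 - 1 = (T : Int) := by ring
        rw [this, Int.ediv_one]
        omega
      rw [h2]
      apply List.map_congr_left
      intro k _
      ring
  rw [h01, List.map_map, String.toList_ofList]
  apply List.map_congr_left
  intro k hk
  have hkT : k < T := List.mem_range.mp hk
  simp only [Function.comp_apply]
  have hidx : (P : Int) - 1 + (k : Int) * (M : Int) = ((P - 1 + M * k : Nat) : Int) := by
    rw [mul_comm ((k : Int)) ((M : Int))]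
    push_cast
    omega
  rw [hidx]
  have htn : (((P - 1 + M * k : Nat) : Int)).toNat = P - 1 + M * k := by omega
  rw [htn]
  have hmain := pvCharAt_eq N hN2 hN16 (P - 1 + M * k + 1) (P - 1 + M * k) 1 (le_refl 1)
    (by omega)
  have hz : pvFirst N 1 = 0 := by simp [pvFirst]
  rw [hz] at hmain
  have hS0 : pvS N 0 = [] := rfl
  rw [hS0] at hmain
  simp only [List.length_nil, Nat.zero_add, pow_one, Nat.sub_zero, Nat.cast_zero,
    Nat.cast_one] at hmain
  exact hmain

-- ===== VERDICT (by name: the statement is the Claim_ definition above) =====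
theorem solution_spec : Claim_equal_solution := by
  intro n t m p _ hpre
  obtain ⟨hn2, hn16, hm, hp⟩ := hpre
  obtain ⟨N, rfl⟩ : ∃ N : Nat, n = (N : Int) := ⟨n.toNat, by omega⟩
  obtain ⟨M, rfl⟩ : ∃ M : Nat, m = (M : Int) := ⟨m.toNat, by omega⟩
  obtain ⟨P, rfl⟩ : ∃ P : Nat, p = (P : Int) := ⟨p.toNat, by omega⟩
  unfold Spec_solution
  by_cases ht : 0 ≤ t
  · obtain ⟨T, rfl⟩ : ∃ T : Nat, t = (T : Int) := ⟨t.toNat, by omega⟩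
    apply String.toList_inj.mp
    rw [pvSolutionA N T M P (by omega) (by omega) (by omega) (by omega),
      pvSolutionB N T M P (by omega) (by omega) (by omega) (by omega)]
  · -- t < 0: both answer loops visit no index at all and return ''
    replace ht : t < 0 := by omega
    apply String.toList_inj.mp
    rw [solution, solution_alt]
    have hprod : (t - 1) * ((M : Nat) : Int) = -((1 - t) * ((M : Nat) : Int)) := by ring
    have hone : (1 : Int) * 1 ≤ (1 - t) * ((M : Nat) : Int) :=
      mul_le_mul (by omega) (by omega) (by omega) (by omega)
    have hA : PySem.List.pyRange ((P : Int) - 1) ((t - 1) * (M : Int) + (P : Int)) (M : Int)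
        = [] := by
      rw [PySem.List.pyRange_of_pos _ _ (by omega : (0 : Int) < (M : Int)),
        if_neg (by omega)]
      simp
    have hB : PySem.List.pyRange 0 t 1 = [] := by
      rw [PySem.List.pyRange_of_pos _ _ one_pos, if_neg (by omega)]
      simp
    rw [hA, hB]
    simp
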